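-- pv_equiv track=rewrite | github.com/angela13st/Graf-algoritmi | V1/plazibat_angela_3c.py | prostisusjedni
-- ===== SOURCE A (Python) =====
-- def provjera(br):
--     flag=False
--     if br<=1:
--         flag=True
--
--     elif br>1:
--         for i in range(2, br):
--             if(br%i==0):
--                 flag=True
--                 break
--     return flag
--
-- def prostisusjedni(n):
--     susjedni=[]
--     i=2
--     while i<=n:
--         if (provjera(i)==False):
--             sljedbenik=i+2
--             prethodnik=i-2
--             if(provjera(sljedbenik)==False or provjera(prethodnik)==False):
--                 susjedni.append(i)
--         i+=1
--     return susjedni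
-- ===== SOURCE B (Python) =====
-- def prostisusjedni(n):
--     if n < 2:
--         return []
--     m = n + 2
--     sieve = [True] * (m + 1)
--     sieve[0] = False
--     sieve[1] = False
--     for p in range(2, m + 1):
--         for q in range(2 * p, m + 1, p):
--             sieve[q] = False
--     return [i for i in range(2, n + 1) if sieve[i] and (sieve[i + 2] or sieve[i - 2])]
-- ===== Notes on version B (the rewrite author's own statement) =====
-- stated objective: faster
-- what changed: Replaced per-candidate trial division (three unbounded divisor scans per i) with one sieve of multiples up to n+2 built once, then a single scan over 2..n reading the table.
import Mathlib
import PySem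

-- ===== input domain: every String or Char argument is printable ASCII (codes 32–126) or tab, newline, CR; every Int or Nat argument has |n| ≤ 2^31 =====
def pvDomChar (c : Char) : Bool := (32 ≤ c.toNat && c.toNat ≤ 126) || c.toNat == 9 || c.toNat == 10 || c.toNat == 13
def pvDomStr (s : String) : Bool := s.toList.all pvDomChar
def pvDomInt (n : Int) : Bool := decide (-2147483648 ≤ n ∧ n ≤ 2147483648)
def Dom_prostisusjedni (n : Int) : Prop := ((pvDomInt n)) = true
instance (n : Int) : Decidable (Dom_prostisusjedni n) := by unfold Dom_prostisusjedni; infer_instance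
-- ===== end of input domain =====

-- B replaces A's per-candidate trial division with one sieve of multiples up to n+2
-- built once and a single table scan (objective: faster, measured on the timing inputs).

-- ===== PORT A =====
-- provjera(br): True if br <= 1 or br has a divisor in [2, br) — i.e. "not prime"
def provjera (br : Int) : Bool :=
  if br ≤ 1 then true
  else (PySem.List.pyRange 2 br 1).any (fun i => PySem.Int.mod br i == 0)

-- while i <= n with i += 1 is traversed as for i in range(2, n+1)
def prostisusjedni (n : Int) : List Int :=
  (PySem.List.pyRange 2 (n + 1) 1).foldl
    (fun susjedni i =>
      if provjera i == false then
        let sljedbenik := i + 2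
        let prethodnik := i - 2
        if provjera sljedbenik == false || provjera prethodnik == false then
          susjedni ++ [i]
        else susjedni
      else susjedni) []

-- ===== PORT B =====
def prostisusjedni_alt (n : Int) : List Int :=
  if n < 2 then []
  else
    let m := n + 2
    let sieve0 : List Bool := PySem.List.pyRepeat [true] (m + 1)   -- [True] * (m+1)
    let sieve1 := PySem.List.pySetD (PySem.List.pySetD sieve0 0 false) 1 false
    let sieve := (PySem.List.pyRange 2 (m + 1) 1).foldl
      (fun s p => (PySem.List.pyRange (2 * p) (m + 1) p).foldl
        (fun s q => PySem.List.pySetD s q false) s) sieve1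
    (PySem.List.pyRange 2 (n + 1) 1).foldl
      (fun acc i =>
        if PySem.List.pyGetD sieve i false &&
           (PySem.List.pyGetD sieve (i + 2) false || PySem.List.pyGetD sieve (i - 2) false)
        then acc ++ [i] else acc) []

-- ===== PRECONDITION & SPEC =====
def Spec_prostisusjedni (n : Int) (out : List Int) : Prop := out = prostisusjedni_alt n
instance (n : Int) (out : List Int) : Decidable (Spec_prostisusjedni n out) := by unfold Spec_prostisusjedni; infer_instance

-- ===== CLAIM (what is proved, stated in full; the proofs are below) =====
def Claim_equal_prostisusjedni : Prop := ∀ (n : Int), Dom_prostisusjedni n → Spec_prostisusjedni n (prostisusjedni n)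

-- ===== LEMMAS AND PROOFS =====

-- reading past the end (with a nonnegative index) gives the default
lemma pyGetD_of_ge_length (xs : List Bool) (q : Int) (d : Bool)
    (h : 0 ≤ q) (h2 : (xs.length : Int) ≤ q) : PySem.List.pyGetD xs q d = d := by
  simp only [PySem.List.pyGetD, PySem.List.pyGet?, PySem.List.pyIdx?]
  rw [if_pos h, if_neg (by omega)]
  rfl

-- reading after one in-range write
lemma getD_setD (xs : List Bool) (j q : Int) (v d : Bool)
    (hj0 : 0 ≤ j) (hj : j < (xs.length : Int)) (hq : 0 ≤ q) :
    PySem.List.pyGetD (PySem.List.pySetD xs j v) q d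
      = if q = j then v else PySem.List.pyGetD xs q d := by
  rw [PySem.List.pySetD_of_nonneg xs v hj0]
  by_cases hql : q < (xs.length : Int)
  · rw [PySem.List.pyGetD_eq_getElem _ d hq (by simpa using hql),
        PySem.List.pyGetD_eq_getElem _ d hq hql]
    rw [List.getElem_set]
    by_cases h : q = j
    · simp [h]
    · rw [if_neg (by omega), if_neg h]
  · rw [pyGetD_of_ge_length _ _ _ hq (by simpa using not_lt.1 hql),
        pyGetD_of_ge_length _ _ _ hq (by simpa using not_lt.1 hql),
        if_neg (by omega)]

lemma length_foldl_set (idxs : List Int) (xs : List Bool) :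
    (idxs.foldl (fun s j => PySem.List.pySetD s j false) xs).length = xs.length := by
  induction idxs generalizing xs with
  | nil => rfl
  | cons j t ih => simp [List.foldl_cons, ih, PySem.List.length_pySetD]

lemma getD_foldl_set (idxs : List Int) (xs : List Bool) (q : Int) (hq : 0 ≤ q)
    (h : ∀ j ∈ idxs, 0 ≤ j ∧ j < (xs.length : Int)) :
    PySem.List.pyGetD (idxs.foldl (fun s j => PySem.List.pySetD s j false) xs) q false
      = if q ∈ idxs then false else PySem.List.pyGetD xs q false := by
  induction idxs generalizing xs with
  | nil => simp
  | cons j t ih =>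
    have hj := h j (by simp)
    rw [List.foldl_cons, ih _ (by
      intro x hx
      have := h x (List.mem_cons_of_mem _ hx)
      simpa [PySem.List.length_pySetD] using this)]
    rw [getD_setD xs j q false false hj.1 hj.2 hq]
    by_cases h1 : q ∈ t
    · simp [h1]
    · by_cases h2 : q = j <;> simp [h1, h2]

lemma getD_foldl2_set (ps : List Int) (mult : Int → List Int) (xs : List Bool) (q : Int)
    (hq : 0 ≤ q)
    (h : ∀ p ∈ ps, ∀ j ∈ mult p, 0 ≤ j ∧ j < (xs.length : Int)) :
    PySem.List.pyGetD
        (ps.foldl (fun s p => (mult p).foldl (fun s q => PySem.List.pySetD s q false) s) xs) q false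
      = if ∃ p ∈ ps, q ∈ mult p then false else PySem.List.pyGetD xs q false := by
  induction ps generalizing xs with
  | nil => simp
  | cons p t ih =>
    rw [List.foldl_cons, ih _ (by
      intro x hx j hj
      have := h x (List.mem_cons_of_mem _ hx) j hj
      simpa [length_foldl_set] using this)]
    rw [getD_foldl_set (mult p) xs q hq (h p (by simp))]
    by_cases h1 : ∃ x ∈ t, q ∈ mult x
    · simp [h1]
    · by_cases h2 : q ∈ mult p <;> simp [h1, h2]

-- the initial table [True]*(m+1) with cells 0 and 1 cleared
lemma getD_init (m q : Int) (hm : 2 ≤ m) (hq : 0 ≤ q) :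
    PySem.List.pyGetD
        (PySem.List.pySetD (PySem.List.pySetD (PySem.List.pyRepeat [true] (m + 1)) 0 false) 1 false)
        q false
      = decide (2 ≤ q ∧ q < m + 1) := by
  rw [PySem.List.pyRepeat_singleton true (m + 1)]
  have hlen : ((List.replicate (m + 1).toNat (true : Bool)).length : Int) = m + 1 := by
    simp; omega
  have hlen1 : (((PySem.List.pySetD (List.replicate (m + 1).toNat (true : Bool)) 0 false : List Bool)).length : Int) = m + 1 := by
    rw [PySem.List.length_pySetD]; exact hlen
  rw [getD_setD _ 1 q false false (by omega) (by rw [hlen1]; omega) hq]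
  by_cases h1 : q = 1
  · simp [h1]
  · rw [if_neg h1, getD_setD _ 0 q false false (by omega) (by rw [hlen]; omega) hq]
    by_cases h0 : q = 0
    · simp [h0]
    · rw [if_neg h0]
      by_cases hlt : q < m + 1
      · rw [PySem.List.pyGetD_eq_getElem _ false hq (by rw [hlen]; omega)]
        rw [List.getElem_replicate]
        have : 2 ≤ q := by omega
        simp [this, hlt]
      · rw [pyGetD_of_ge_length _ _ _ hq (by rw [hlen]; omega)]
        simp; omega

-- "q is not marked by the sieve": q has no divisor p >= 2 with 2p <= q
def Unmarked (q : Int) : Prop := ¬ ∃ p, 2 ≤ p ∧ p ∣ q ∧ 2 * p ≤ q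

-- the finished sieve read at q (0 ≤ q ≤ m)
lemma getD_sieve (m q : Int) (hm : 2 ≤ m) (hq0 : 0 ≤ q) (hqm : q ≤ m) :
    PySem.List.pyGetD
        ((PySem.List.pyRange 2 (m + 1) 1).foldl
          (fun s p => (PySem.List.pyRange (2 * p) (m + 1) p).foldl
            (fun s q => PySem.List.pySetD s q false) s)
          (PySem.List.pySetD (PySem.List.pySetD (PySem.List.pyRepeat [true] (m + 1)) 0 false) 1 false))
        q false = true
      ↔ (2 ≤ q ∧ Unmarked q) := by
  have hlen : (((PySem.List.pySetD (PySem.List.pySetD (PySem.List.pyRepeat [true] (m + 1)) 0 false) 1 false : List Bool)).length : Int) = m + 1 := by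
    rw [PySem.List.length_pySetD, PySem.List.length_pySetD,
        PySem.List.pyRepeat_singleton true (m + 1)]
    simp; omega
  rw [getD_foldl2_set _ _ _ q hq0 (by
    intro p hp j hj
    have hp2 : 2 ≤ p := (PySem.List.mem_pyRange_one.1 hp).1
    have := (PySem.List.mem_pyRange_iff_of_pos (by omega) j).1 hj
    constructor
    · omega
    · rw [hlen]; omega)]
  by_cases hex : ∃ p ∈ PySem.List.pyRange 2 (m + 1) 1, q ∈ PySem.List.pyRange (2 * p) (m + 1) p
  · rw [if_pos hex]
    obtain ⟨p, hp, hq⟩ := hex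
    have hp2 := PySem.List.mem_pyRange_one.1 hp
    have hqq := (PySem.List.mem_pyRange_iff_of_pos (by omega) q).1 hq
    have hdvd : p ∣ q := by
      obtain ⟨k, hk⟩ := hqq.2.2
      exact ⟨2 + k, by linarith⟩
    simp only [Bool.false_eq_true, false_iff, not_and]
    intro _ hu
    exact hu ⟨p, hp2.1, hdvd, hqq.1⟩
  · rw [if_neg hex, getD_init m q hm hq0]
    simp only [decide_eq_true_eq]
    constructor
    · rintro ⟨h2, _⟩
      refine ⟨h2, ?_⟩
      rintro ⟨p, hp2, hdvd, hle⟩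
      apply hex
      refine ⟨p, PySem.List.mem_pyRange_one.2 ⟨hp2, by omega⟩, ?_⟩
      rw [PySem.List.mem_pyRange_iff_of_pos (by omega)]
      refine ⟨hle, by omega, ?_⟩
      obtain ⟨k, hk⟩ := hdvd
      exact ⟨k - 2, by linarith⟩
    · rintro ⟨h2, _⟩
      exact ⟨h2, by omega⟩

-- provjera x = false  ↔  x is prime-like: 2 ≤ x and no divisor in [2, x)
lemma provjera_eq_false_iff (x : Int) :
    provjera x = false ↔ (2 ≤ x ∧ ¬ ∃ i, 2 ≤ i ∧ i < x ∧ i ∣ x) := by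
  unfold provjera
  by_cases hx : x ≤ 1
  · simp [hx]
  · rw [if_neg hx]
    rw [Bool.eq_false_iff, ne_eq, List.any_eq_true]
    constructor
    · intro h
      refine ⟨by omega, ?_⟩
      rintro ⟨i, h2, hlt, hdvd⟩
      exact h ⟨i, PySem.List.mem_pyRange_one.2 ⟨h2, hlt⟩,
        by rw [beq_iff_eq, PySem.Int.mod_eq_zero_iff_dvd]; exact hdvd⟩
    · rintro ⟨-, h⟩ ⟨i, hi, hmod⟩
      have hi' := PySem.List.mem_pyRange_one.1 hi
      rw [beq_iff_eq, PySem.Int.mod_eq_zero_iff_dvd] at hmod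
      exact h ⟨i, hi'.1, hi'.2, hmod⟩

-- divisor bound bridge: for 2 ≤ x the two "has a proper divisor" forms agree
lemma divisor_bridge (x : Int) (_hx : 2 ≤ x) :
    (∃ i, 2 ≤ i ∧ i < x ∧ i ∣ x) ↔ (∃ p, 2 ≤ p ∧ p ∣ x ∧ 2 * p ≤ x) := by
  constructor
  · rintro ⟨i, h2, hlt, k, hk⟩
    refine ⟨i, h2, ⟨k, hk⟩, ?_⟩
    have hk2 : 2 ≤ k := by nlinarith
    nlinarith
  · rintro ⟨p, h2, hd, hle⟩
    exact ⟨p, h2, by omega, hd⟩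

lemma provjera_false_iff_unmarked (x : Int) :
    provjera x = false ↔ (2 ≤ x ∧ Unmarked x) := by
  rw [provjera_eq_false_iff]
  unfold Unmarked
  constructor
  · rintro ⟨h2, h⟩
    exact ⟨h2, fun he => h ((divisor_bridge x h2).2 he)⟩
  · rintro ⟨h2, h⟩
    exact ⟨h2, fun he => h ((divisor_bridge x h2).1 he)⟩

-- ===== VERDICT (by name: the statement is the Claim_ definition above) =====
theorem prostisusjedni_spec : Claim_equal_prostisusjedni := by
  intro n _
  unfold Spec_prostisusjedni prostisusjedni prostisusjedni_alt
  by_cases hn : n < 2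
  · rw [if_pos hn, PySem.List.pyRange_one_eq_nil (by omega)]
    rfl
  · rw [if_neg hn]
    simp only []
    rw [List.foldl_ext _
      (fun (acc : List Int) (i : Int) =>
        if ((provjera i == false) &&
            ((provjera (i + 2) == false) || (provjera (i - 2) == false))) then acc ++ [i] else acc)
      []
      (by
        intro acc i _
        cases h1 : (provjera i == false) <;> simp [h1])]
    rw [PySem.List.foldl_append_if_eq_filter, PySem.List.foldl_append_if_eq_filter]
    rw [List.nil_append, List.nil_append]
    apply List.filter_congr
    intro i hi
    have hi' := PySem.List.mem_pyRange_one.1 hi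
    have hm : (2 : Int) ≤ n + 2 := by omega
    rw [Bool.eq_iff_iff]
    simp only [Bool.and_eq_true, Bool.or_eq_true, beq_iff_eq]
    rw [provjera_false_iff_unmarked, provjera_false_iff_unmarked, provjera_false_iff_unmarked,
        getD_sieve (n + 2) i hm (by omega) (by omega),
        getD_sieve (n + 2) (i + 2) hm (by omega) (by omega),
        getD_sieve (n + 2) (i - 2) hm (by omega) (by omega)]
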